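-- pv_equiv track=rewrite | github.com/hamuhamuhamu/Style-Bert-VITS2 | tests/test_normalizer.py | _convert_room_digits_for_expected
-- ===== SOURCE A (Python) =====
-- def _convert_room_digits_for_expected(digits: str) -> str:
--     """号室・部屋番号の期待値生成用ヘルパー。"""
--
--     digit_to_katakana = {
--         "0": "ゼロ",
--         "1": "イチ",
--         "2": "ニー",
--         "3": "サン",
--         "4": "ヨン",
--         "5": "ゴー",
--         "6": "ロク",
--         "7": "ナナ",
--         "8": "ハチ",
--         "9": "キュー",
--     }
--     digit_to_short = {
--         "2": "ニ",
--         "5": "ゴ",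
--     }
--
--     # 3桁の部屋番号のみ中間 0 をマルと読む
--     # 4桁以上の部屋番号では中間 0 もゼロと読む
--     ## 例: 3桁 "409" → ヨンマルキュー, 4桁 "1203" → イチニーゼロサン
--     is_use_maru = len(digits) == 3
--
--     converted = ""
--     for index, digit in enumerate(digits):
--         is_first = index == 0
--         is_last = index == len(digits) - 1
--         # 中間 0 はマルにする（3桁かつ前後がともに非 0 の場合のみ）
--         if (
--             is_use_maru is True
--             and is_first is False
--             and is_last is False
--             and digit == "0"
--             and digits[index - 1] != "0"
--             and digits[index + 1] != "0"
--         ):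
--             converted += "マル"
--             continue
--         # 末尾の 2 / 5 は短く読む
--         if is_last is True and digit in digit_to_short:
--             converted += digit_to_short[digit]
--             continue
--         converted += digit_to_katakana[digit]
--     return converted
-- ===== SOURCE B (Python) =====
-- def _convert_room_digits_for_expected(digits: str) -> str:
--     """号室・部屋番号の期待値生成用ヘルパー（マル読みは全体形で早期リターン、
--     それ以外は右から左へ読みを積み、末尾かどうかは蓄積の空判定で決める方式）。"""
--
--     digit_to_katakana = {
--         "0": "ゼロ",
--         "1": "イチ",
--         "2": "ニー",
--         "3": "サン",
--         "4": "ヨン",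
--         "5": "ゴー",
--         "6": "ロク",
--         "7": "ナナ",
--         "8": "ハチ",
--         "9": "キュー",
--     }
--     digit_to_short = {
--         "2": "ニ",
--         "5": "ゴ",
--     }
--
--     # 「中間 0 をマルと読む」3桁形は全体の形で判定して直接組み立てる
--     if len(digits) == 3 and digits[1] == "0" and digits[0] != "0" and digits[2] != "0":
--         return (
--             digit_to_katakana[digits[0]]
--             + "マル"
--             + digit_to_short.get(digits[2], digit_to_katakana[digits[2]])
--         )
--
--     # 右から左へ読みを積む: 最後の桁（＝最初の反復）だけ短い読みを許す
--     parts = []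
--     for d in reversed(digits):
--         if not parts:
--             parts.append(digit_to_short.get(d, digit_to_katakana[d]))
--         else:
--             parts.append(digit_to_katakana[d])
--     return "".join(reversed(parts))
-- ===== Notes on version B (the rewrite author's own statement) =====
-- stated objective: alternative
-- what changed: B handles the 3-digit middle-zero 'maru' form by a whole-shape early return assembled directly from the three digits, and otherwise builds the reading back-to-front over the reversed string, detecting the last digit (short 2/5 reading) by the accumulator being empty instead of A's per-index first/last/neighbour flag tests in a forward loop.
import Mathlib
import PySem

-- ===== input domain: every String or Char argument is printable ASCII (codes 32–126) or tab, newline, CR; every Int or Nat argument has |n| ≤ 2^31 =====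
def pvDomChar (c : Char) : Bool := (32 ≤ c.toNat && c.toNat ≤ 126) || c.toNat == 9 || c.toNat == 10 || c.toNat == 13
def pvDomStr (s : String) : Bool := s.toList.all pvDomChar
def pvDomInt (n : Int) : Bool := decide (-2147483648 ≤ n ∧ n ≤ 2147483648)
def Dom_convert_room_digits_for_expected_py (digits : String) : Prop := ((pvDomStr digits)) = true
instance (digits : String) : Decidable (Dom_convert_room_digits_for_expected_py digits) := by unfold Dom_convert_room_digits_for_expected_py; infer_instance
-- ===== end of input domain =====

set_option maxHeartbeats 1000000
set_option maxRecDepth 8000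


-- B returns the 3-digit middle-zero "maru" form directly by a whole-shape early return,
-- and otherwise builds the reading back-to-front over the reversed string, detecting the
-- last digit by the accumulator being empty (objective: alternative decomposition).

-- ===== PORT A =====
-- digit_to_katakana lookup; non-digit chars are outside Pre_ (Python raises KeyError there)
def pvKat (c : Char) : String :=
  if c = '0' then "ゼロ" else if c = '1' then "イチ" else if c = '2' then "ニー"
  else if c = '3' then "サン" else if c = '4' then "ヨン" else if c = '5' then "ゴー"
  else if c = '6' then "ロク" else if c = '7' then "ナナ" else if c = '8' then "ハチ"
  else if c = '9' then "キュー" else ""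

-- digit_to_short lookup (membership is tested before use, so total here)
def pvShort (c : Char) : String :=
  if c = '2' then "ニ" else if c = '5' then "ゴ" else ""

-- literal port of A's enumerate-loop; digits[index-1]/[index+1] are only read under
-- the guards index ≠ 0 and index ≠ len-1, so the Nat getD accesses are exact
def convert_room_digits_for_expected_py (digits : String) : String :=
  let l := digits.toList
  let n := l.length
  (List.range n).foldl (fun conv i =>
    let d := l.getD i ' '
    if n = 3 ∧ i ≠ 0 ∧ i ≠ n - 1 ∧ d = '0' ∧
        l.getD (i - 1) ' ' ≠ '0' ∧ l.getD (i + 1) ' ' ≠ '0' then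
      conv ++ "マル"
    else if i = n - 1 ∧ (d = '2' ∨ d = '5') then
      conv ++ pvShort d
    else
      conv ++ pvKat d) ""

-- ===== PORT B =====
-- digit_to_short.get(d, digit_to_katakana[d])
def pvGetShort (c : Char) : String :=
  if c = '2' ∨ c = '5' then pvShort c else pvKat c

def convert_room_digits_for_expected_py_alt (digits : String) : String :=
  let l := digits.toList
  if l.length = 3 ∧ l.getD 1 ' ' = '0' ∧ l.getD 0 ' ' ≠ '0' ∧ l.getD 2 ' ' ≠ '0' then
    pvKat (l.getD 0 ' ') ++ "マル" ++ pvGetShort (l.getD 2 ' ')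
  else
    let parts := l.reverse.foldl
      (fun parts d =>
        if parts = [] then parts ++ [pvGetShort d] else parts ++ [pvKat d]) []
    String.join parts.reverse

-- ===== PRECONDITION & SPEC =====
-- Pre_ excludes exactly the inputs containing a non-digit character, on which
-- Python A raises KeyError (and Python B raises KeyError too).
def Pre_convert_room_digits_for_expected_py (digits : String) : Prop :=
  digits.toList.all (fun c => c.isDigit) = true
instance (digits : String) : Decidable (Pre_convert_room_digits_for_expected_py digits) := by
  unfold Pre_convert_room_digits_for_expected_py; infer_instance
def pvWitness_convert_room_digits_for_expected_py : String := "409"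

def Spec_convert_room_digits_for_expected_py (digits : String) (out : String) : Prop := out = convert_room_digits_for_expected_py_alt digits
instance (digits : String) (out : String) : Decidable (Spec_convert_room_digits_for_expected_py digits out) := by unfold Spec_convert_room_digits_for_expected_py; infer_instance

-- ===== CLAIM (what is proved, stated in full; the proofs are below) =====
def Claim_equal_convert_room_digits_for_expected_py : Prop := ∀ (digits : String), Dom_convert_room_digits_for_expected_py digits → Pre_convert_room_digits_for_expected_py digits → Spec_convert_room_digits_for_expected_py digits (convert_room_digits_for_expected_py digits)

-- ===== LEMMAS AND PROOFS =====

-- the per-index piece emitted by A's loop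
def pvPiece (l : List Char) (i : Nat) : String :=
  let d := l.getD i ' '
  if l.length = 3 ∧ i ≠ 0 ∧ i ≠ l.length - 1 ∧ d = '0' ∧
      l.getD (i - 1) ' ' ≠ '0' ∧ l.getD (i + 1) ' ' ≠ '0' then "マル"
  else if i = l.length - 1 ∧ (d = '2' ∨ d = '5') then pvShort d
  else pvKat d

-- the per-index piece once the maru case is ruled out
def pvQ (l : List Char) (i : Nat) : String :=
  if i = l.length - 1 ∧ (l.getD i ' ' = '2' ∨ l.getD i ' ' = '5') then
    pvShort (l.getD i ' ')
  else pvKat (l.getD i ' ')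

theorem pv_foldl_acc (m : List String) (a : String) :
    m.foldl (fun r s => r ++ s) a = a ++ m.foldl (fun r s => r ++ s) "" := by
  induction m generalizing a with
  | nil => simp
  | cons x xs ih =>
    rw [List.foldl_cons, List.foldl_cons, ih (a ++ x), ih ("" ++ x)]
    simp [String.append_assoc]

theorem pv_join_cons (x : String) (xs : List String) :
    String.join (x :: xs) = x ++ String.join xs := by
  simp only [String.join, List.foldl_cons]
  rw [pv_foldl_acc]; simp

theorem pv_join_append (a b : List String) :
    String.join (a ++ b) = String.join a ++ String.join b := by
  induction a with
  | nil => simp [String.join]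
  | cons x xs ih => simp [pv_join_cons, ih, String.append_assoc]

theorem pv_foldl_join (f : Nat → String) (l : List Nat) (a : String) :
    l.foldl (fun s i => s ++ f i) a = a ++ String.join (l.map f) := by
  induction l generalizing a with
  | nil => simp [String.join]
  | cons x xs ih =>
    simp only [List.foldl_cons, List.map_cons, ih, pv_join_cons, String.append_assoc]

theorem pv_portA_join (digits : String) :
    convert_room_digits_for_expected_py digits =
      String.join ((List.range digits.toList.length).map (pvPiece digits.toList)) := by
  unfold convert_room_digits_for_expected_py
  have h : (fun (conv : String) (i : Nat) =>
      let d := digits.toList.getD i ' '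
      if digits.toList.length = 3 ∧ i ≠ 0 ∧ i ≠ digits.toList.length - 1 ∧ d = '0' ∧
          digits.toList.getD (i - 1) ' ' ≠ '0' ∧ digits.toList.getD (i + 1) ' ' ≠ '0' then
        conv ++ "マル"
      else if i = digits.toList.length - 1 ∧ (d = '2' ∨ d = '5') then
        conv ++ pvShort d
      else
        conv ++ pvKat d) = fun conv i => conv ++ pvPiece digits.toList i := by
    funext conv i
    simp only [pvPiece]
    split_ifs <;> rfl
  simp only [h, pv_foldl_join]
  simp

-- once the maru condition fails for the whole string, A's piece is pvQ
theorem pv_piece_eq_q (l : List Char)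
    (hC : ¬(l.length = 3 ∧ l.getD 1 ' ' = '0' ∧ l.getD 0 ' ' ≠ '0' ∧ l.getD 2 ' ' ≠ '0'))
    (i : Nat) (hi : i < l.length) :
    pvPiece l i = pvQ l i := by
  simp only [pvPiece, pvQ]
  rw [if_neg]
  intro h
  obtain ⟨h3, h0, hl, hd, hp, hn⟩ := h
  have hi1 : i = 1 := by omega
  subst hi1
  exact hC ⟨h3, hd, hp, by simpa using hn⟩

-- B's loop once the accumulator is non-empty only appends katakana readings
theorem pv_parts_snoc (r : List Char) (acc : List String) (h : acc ≠ []) :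
    r.foldl (fun parts d =>
      if parts = [] then parts ++ [pvGetShort d] else parts ++ [pvKat d]) acc
      = acc ++ r.map pvKat := by
  induction r generalizing acc with
  | nil => simp
  | cons d rs ih =>
    simp only [List.foldl_cons, if_neg h]
    rw [ih (acc ++ [pvKat d]) (by simp)]
    simp

theorem pv_parts_eq (d : Char) (rs : List Char) :
    (d :: rs).foldl (fun parts d =>
      if parts = [] then parts ++ [pvGetShort d] else parts ++ [pvKat d]) []
      = pvGetShort d :: rs.map pvKat := by
  rw [List.foldl_cons, if_pos rfl, List.nil_append, pv_parts_snoc _ _ (by simp)]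
  rfl

theorem pv_getD_append_last (m : List Char) (d : Char) :
    (m ++ [d]).getD m.length ' ' = d := by
  simp [List.getD]

theorem pv_getD_append_left (m : List Char) (d : Char) (i : Nat) (hi : i < m.length) :
    (m ++ [d]).getD i ' ' = m.getD i ' ' := by
  simp [List.getD, List.getElem?_append_left hi]

theorem pv_equiv (digits : String) :
    convert_room_digits_for_expected_py digits = convert_room_digits_for_expected_py_alt digits := by
  rw [pv_portA_join]
  unfold convert_room_digits_for_expected_py_alt
  set l := digits.toList with hl
  by_cases hC : (l.length = 3 ∧ l.getD 1 ' ' = '0' ∧ l.getD 0 ' ' ≠ '0' ∧ l.getD 2 ' ' ≠ '0')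
  · rw [if_pos hC]
    obtain ⟨h3, hb, ha, hc⟩ := hC
    obtain ⟨a, b, c, hL⟩ := List.length_eq_three.mp h3
    rw [hL] at hb ha hc ⊢
    simp only [List.getD, List.length_cons, List.length_nil, List.getElem?_cons_zero,
      List.getElem?_cons_succ, Option.getD_some] at hb ha hc ⊢
    subst hb
    have hrange : List.range 3 = [0, 1, 2] := by decide
    rw [hrange]
    simp only [List.map_cons, List.map_nil, pv_join_cons]
    have p0 : pvPiece [a, '0', c] 0 = pvKat a := by
      simp only [pvPiece]
      rw [if_neg (by simp), if_neg (by simp [List.getD])]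
      simp [List.getD]
    have p1 : pvPiece [a, '0', c] 1 = "マル" := by
      simp only [pvPiece]
      rw [if_pos]
      refine ⟨rfl, by simp, by simp, ?_, ?_, ?_⟩ <;> simp [List.getD, ha, hc]
    have p2 : pvPiece [a, '0', c] 2 = pvGetShort c := by
      simp only [pvPiece, pvGetShort]
      rw [if_neg (by simp)]
      simp [List.getD]
    rw [p0, p1, p2]
    simp [String.join, String.append_assoc]
  · rw [if_neg hC]
    have hpiece : (List.range l.length).map (pvPiece l) = (List.range l.length).map (pvQ l) :=
      List.map_congr_left (fun i hi => pv_piece_eq_q l hC i (List.mem_range.mp hi))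
    rw [hpiece]
    cases hr : l.reverse with
    | nil =>
      have : l = [] := by simpa using congrArg List.reverse hr
      simp [this, String.join]
    | cons d rs =>
      have hlr : l = rs.reverse ++ [d] := by
        have := congrArg List.reverse hr
        simpa using this
      simp only [pv_parts_eq]
      set m := rs.reverse with hm
      have hlen : l.length = m.length + 1 := by rw [hlr]; simp
      have hrev : (pvGetShort d :: rs.map pvKat).reverse = m.map pvKat ++ [pvGetShort d] := by
        simp [hm, List.map_reverse]
      rw [hrev]
      rw [hlen, List.range_succ, List.map_append, pv_join_append, pv_join_append]
      congr 1
      · congr 1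
        apply List.ext_getElem
        · simp
        · intro i h1 h2
          simp only [List.getElem_map, List.getElem_range]
          have him : i < m.length := by simpa using h1
          simp only [pvQ, hlen]
          rw [if_neg (by
            rintro ⟨h, -⟩
            omega)]
          rw [hlr, pv_getD_append_left m d i him]
          simp [List.getD, List.getElem?_eq_getElem him]
      · simp only [List.map_cons, List.map_nil]
        congr 1
        simp only [pvQ, pvGetShort, hlen, Nat.add_sub_cancel]
        rw [hlr, pv_getD_append_last]
        simp

-- ===== VERDICT (by name: the statement is the Claim_ definition above) =====
theorem convert_room_digits_for_expected_py_spec : Claim_equal_convert_room_digits_for_expected_py := by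
  intro digits _ _
  unfold Spec_convert_room_digits_for_expected_py
  exact pv_equiv digits
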